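-- pv_equiv track=rewrite | github.com/max-toscano/nouri-ai- | backend/workout_quiz/services/programming_rules/constraint_rules.py | _compute_restriction_level
-- ===== SOURCE A (Python) =====
-- _SEVERITY_RANK: dict[str, int] = {
--     "none":     0,
--     "low":      1,
--     "moderate": 2,
--     "high":     3,
-- }
--
-- _RANK_TO_SEVERITY: dict[int, str] = {v: k for k, v in _SEVERITY_RANK.items()}
--
-- def _max_severity(*levels: str) -> str:
--     """Returns the highest severity string from the supplied levels."""
--     return _RANK_TO_SEVERITY[max(_SEVERITY_RANK[lv] for lv in levels)]
--
-- class RestrictionLevel: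
--     NONE     = "none"
--     LOW      = "low"
--     MODERATE = "moderate"
--     HIGH     = "high"
--
-- def _compute_restriction_level(
--     injured_areas: list[str],
--     restriction_table: dict[str, str],
-- ) -> str:
--     """
--     Scans the injured areas list against a restriction table and returns the
--     maximum severity found.  Returns 'none' if no relevant areas are injured.
--     """
--     levels = [
--         restriction_table[area]
--         for area in injured_areas
--         if area in restriction_table
--     ]
--     if not levels:
--         return RestrictionLevel.NONE
--     return _max_severity(*levels)
-- ===== SOURCE B (Python) =====
-- def _compute_restriction_level(injured_areas, restriction_table):
--     present = {restriction_table[a] for a in injured_areas if a in restriction_table}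
--     for sev in ("high", "moderate", "low", "none"):
--         if sev in present:
--             return sev
--     return "none"
-- ===== Notes on version B (the rewrite author's own statement) =====
-- stated objective: alternative
-- what changed: Replaces the rank-table max reduction (map to ints, max, map back to a string) by building the set of severities present and returning the first hit of a fixed highest-first priority probe.
import Mathlib
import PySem

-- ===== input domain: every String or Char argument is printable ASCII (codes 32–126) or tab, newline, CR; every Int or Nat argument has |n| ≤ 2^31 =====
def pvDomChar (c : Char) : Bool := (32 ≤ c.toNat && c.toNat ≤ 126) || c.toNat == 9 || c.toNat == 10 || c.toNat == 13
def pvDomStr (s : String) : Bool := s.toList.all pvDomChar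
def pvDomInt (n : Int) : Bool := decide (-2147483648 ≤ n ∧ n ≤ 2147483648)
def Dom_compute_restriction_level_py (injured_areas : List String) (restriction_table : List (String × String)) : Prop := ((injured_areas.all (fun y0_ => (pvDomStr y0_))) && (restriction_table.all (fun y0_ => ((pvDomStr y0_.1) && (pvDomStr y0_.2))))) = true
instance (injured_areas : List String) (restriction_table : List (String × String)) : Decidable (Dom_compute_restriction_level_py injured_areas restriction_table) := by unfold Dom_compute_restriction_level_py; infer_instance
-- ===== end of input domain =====

-- B replaces A's rank-table max reduction by a highest-first membership probe over the set of
-- severities present (alternative decomposition, same cost); Pre_ excludes inputs where A raises KeyError.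


-- ===== PORT A =====
-- _SEVERITY_RANK
def pvSevRank : PySem.Dict String Int :=
  PySem.Dict.mk [("none", 0), ("low", 1), ("moderate", 2), ("high", 3)]

-- _RANK_TO_SEVERITY
def pvRankToSev : PySem.Dict Int String :=
  PySem.Dict.mk [(0, "none"), (1, "low"), (2, "moderate"), (3, "high")]

-- _max_severity(*levels); _SEVERITY_RANK[lv] raises KeyError on unknown lv (excluded by Pre_),
-- so the defaults (-1) and "" are unreachable under Pre_.
def pvMaxSeverity (levels : List String) : String :=
  match PySem.List.max? (levels.map (fun lv => pvSevRank.getD lv (-1))) (fun x => x) with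
  | some m => pvRankToSev.getD m ""
  | none => ""   -- unreachable: called only with levels ≠ []

def compute_restriction_level_py (injured_areas : List String) (restriction_table : List (String × String)) : String :=
  -- levels = [restriction_table[area] for area in injured_areas if area in restriction_table]
  let levels := injured_areas.filterMap (fun area => (PySem.Dict.mk restriction_table).get? area)
  if levels = [] then "none"
  else pvMaxSeverity levels

-- ===== PORT B =====
def compute_restriction_level_py_alt (injured_areas : List String) (restriction_table : List (String × String)) : String :=
  -- present = {restriction_table[a] for a in injured_areas if a in restriction_table}
  let present : PySem.Set String :=
    PySem.Set.ofList (injured_areas.filterMap (fun a => (PySem.Dict.mk restriction_table).get? a))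
  -- for sev in ("high","moderate","low","none"): if sev in present: return sev
  match (["high", "moderate", "low", "none"].find? (fun sev => PySem.Set.contains present sev)) with
  | some sev => sev
  | none => "none"

-- ===== PRECONDITION & SPEC =====
-- Pre_ excludes exactly the inputs on which A raises KeyError (and B would return a value): some injured area's table entry
-- is a severity string outside the four known ones.
def Pre_compute_restriction_level_py (injured_areas : List String) (restriction_table : List (String × String)) : Prop :=
  ∀ v ∈ injured_areas.filterMap (fun a => (PySem.Dict.mk restriction_table).get? a),
    v = "none" ∨ v = "low" ∨ v = "moderate" ∨ v = "high"
instance (injured_areas : List String) (restriction_table : List (String × String)) : Decidable (Pre_compute_restriction_level_py injured_areas restriction_table) := by unfold Pre_compute_restriction_level_py; infer_instance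

def pvWitness_compute_restriction_level_py : List String × (List (String × String)) :=
  (["knee", "arm"], [("knee", "high"), ("arm", "low")])

def Spec_compute_restriction_level_py (injured_areas : List String) (restriction_table : List (String × String)) (out : String) : Prop := out = compute_restriction_level_py_alt injured_areas restriction_table
instance (injured_areas : List String) (restriction_table : List (String × String)) (out : String) : Decidable (Spec_compute_restriction_level_py injured_areas restriction_table out) := by unfold Spec_compute_restriction_level_py; infer_instance

-- ===== CLAIM (what is proved, stated in full; the proofs are below) =====
def Claim_equal_compute_restriction_level_py : Prop := ∀ (injured_areas : List String) (restriction_table : List (String × String)), Dom_compute_restriction_level_py injured_areas restriction_table → Pre_compute_restriction_level_py injured_areas restriction_table → Spec_compute_restriction_level_py injured_areas restriction_table (compute_restriction_level_py injured_areas restriction_table)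


-- ===== LEMMAS AND PROOFS =====

-- the common value both programs compute from the list of relevant severities
def pvPick (L : List String) : String :=
  if "high" ∈ L then "high"
  else if "moderate" ∈ L then "moderate"
  else if "low" ∈ L then "low"
  else "none"

def pvPickRank (L : List String) : Int :=
  if "high" ∈ L then 3
  else if "moderate" ∈ L then 2
  else if "low" ∈ L then 1
  else 0

-- evaluations of A's two literal rank tables
lemma pvRkN : pvSevRank.getD "none" (-1) = 0 := by decide
lemma pvRkL : pvSevRank.getD "low" (-1) = 1 := by decide
lemma pvRkM : pvSevRank.getD "moderate" (-1) = 2 := by decide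
lemma pvRkH : pvSevRank.getD "high" (-1) = 3 := by decide
lemma pvRts0 : pvRankToSev.getD 0 "" = "none" := by decide
lemma pvRts1 : pvRankToSev.getD 1 "" = "low" := by decide
lemma pvRts2 : pvRankToSev.getD 2 "" = "moderate" := by decide
lemma pvRts3 : pvRankToSev.getD 3 "" = "high" := by decide

lemma pvFoldlMaxRanks (L : List String)
    (h : ∀ v ∈ L, v = "none" ∨ v = "low" ∨ v = "moderate" ∨ v = "high") :
    ∀ r : Int, 0 ≤ r →
      (L.map (fun lv => pvSevRank.getD lv (-1))).foldl max r = max r (pvPickRank L) := by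
  induction L with
  | nil => intro r hr; simp [pvPickRank, max_eq_left hr]
  | cons v tl ih =>
    intro r hr
    have hv := h v (List.mem_cons_self ..)
    have htl : ∀ x ∈ tl, x = "none" ∨ x = "low" ∨ x = "moderate" ∨ x = "high" :=
      fun x hx => h x (List.mem_cons_of_mem _ hx)
    have step : (tl.map (fun lv => pvSevRank.getD lv (-1))).foldl max
        (max r (pvSevRank.getD v (-1))) = max (max r (pvSevRank.getD v (-1))) (pvPickRank tl) := by
      apply ih htl
      rcases hv with rfl | rfl | rfl | rfl <;>
        simp only [pvRkN, pvRkL, pvRkM, pvRkH] <;> omega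
    simp only [List.map_cons, List.foldl_cons, step]
    rcases hv with rfl | rfl | rfl | rfl <;>
      simp only [pvRkN, pvRkL, pvRkM, pvRkH, pvPickRank, List.mem_cons] <;>
      by_cases h1 : "high" ∈ tl <;> by_cases h2 : "moderate" ∈ tl <;> by_cases h3 : "low" ∈ tl <;>
      simp [h1, h2, h3] <;> omega

lemma pvA_eq_pick (L : List String)
    (h : ∀ v ∈ L, v = "none" ∨ v = "low" ∨ v = "moderate" ∨ v = "high") :
    (if L = [] then "none" else pvMaxSeverity L) = pvPick L := by
  cases L with
  | nil => simp [pvPick]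
  | cons v tl =>
    have htl : ∀ x ∈ tl, x = "none" ∨ x = "low" ∨ x = "moderate" ∨ x = "high" :=
      fun x hx => h x (List.mem_cons_of_mem _ hx)
    have hv := h v (List.mem_cons_self ..)
    have hr0 : (0 : Int) ≤ pvSevRank.getD v (-1) := by
      rcases hv with rfl | rfl | rfl | rfl <;>
        simp only [pvRkN, pvRkL, pvRkM, pvRkH] <;> omega
    simp only [if_neg (List.cons_ne_nil v tl), pvMaxSeverity, List.map_cons,
      PySem.List.max?_id_cons]
    have hm : (tl.map (fun lv => pvSevRank.getD lv (-1))).foldl max (pvSevRank.getD v (-1))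
        = max (pvSevRank.getD v (-1)) (pvPickRank tl) := pvFoldlMaxRanks tl htl _ hr0
    rw [hm]
    rcases hv with rfl | rfl | rfl | rfl <;>
      simp only [pvRkN, pvRkL, pvRkM, pvRkH, pvPick, pvPickRank, List.mem_cons] <;>
      by_cases h1 : "high" ∈ tl <;> by_cases h2 : "moderate" ∈ tl <;> by_cases h3 : "low" ∈ tl <;>
      simp [h1, h2, h3] <;>
      norm_num [pvRts0, pvRts1, pvRts2, pvRts3]

lemma pvB_eq_pick (L : List String) :
    (match (["high", "moderate", "low", "none"].find?
        (fun sev => PySem.Set.contains (PySem.Set.ofList L) sev)) with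
      | some sev => sev
      | none => "none") = pvPick L := by
  by_cases h1 : "high" ∈ L <;> by_cases h2 : "moderate" ∈ L <;> by_cases h3 : "low" ∈ L <;>
    by_cases h4 : "none" ∈ L <;>
    simp [List.find?, PySem.Set.contains_eq_listContains, List.contains_eq_mem,
      PySem.Set.mem_ofList, h1, h2, h3, h4, pvPick]

-- ===== VERDICT (by name: the statement is the Claim_ definition above) =====
theorem compute_restriction_level_py_spec : Claim_equal_compute_restriction_level_py := by
  intro ia table _ hpre
  unfold Spec_compute_restriction_level_py compute_restriction_level_py compute_restriction_level_py_alt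
  rw [pvA_eq_pick _ hpre, pvB_eq_pick]
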